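-- pv_equiv track=rewrite | github.com/arvind021/Nm | bot34.py | _bypass_text
-- ===== SOURCE A (Python) =====
-- def _bypass_text(message):
--     """Smart text modification to bypass spam filters"""
--     import unicodedata
--     # Method 1: Zero width spaces add karo
--     zwsp = '\u200b'
--     result = zwsp.join(list(message))
--
--     # Method 2: Similar looking unicode chars replace karo
--     replacements = {
--         'a': 'а', 'e': 'е', 'o': 'о', 'p': 'р',
--         'c': 'с', 'x': 'х', 'A': 'А', 'E': 'Е',
--         'O': 'О', 'B': 'В', 'H': 'Н', 'M': 'М',
--     }
--     # Only replace a few chars to keep readable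
--     count = 0
--     result2 = ""
--     for ch in message:
--         if ch in replacements and count < 3:
--             result2 += replacements[ch]
--             count += 1
--         else:
--             result2 += ch
--
--     return result2
-- ===== SOURCE B (Python) =====
-- def _bypass_text(message):
--     """Smart text modification to bypass spam filters"""
--     replacements = {
--         'a': 'а', 'e': 'е', 'o': 'о', 'p': 'р',
--         'c': 'с', 'x': 'х', 'A': 'А', 'E': 'Е',
--         'O': 'О', 'B': 'В', 'H': 'Н', 'M': 'М',
--     }
--     table = str.maketrans(replacements)
--     # find the cutoff: index just past the 3rd replaceable char (or end of string)
--     cut = len(message)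
--     count = 0
--     for i, ch in enumerate(message):
--         if ch in replacements:
--             count += 1
--             if count == 3:
--                 cut = i + 1
--                 break
--     return message[:cut].translate(table) + message[cut:]
-- ===== Notes on version B (the rewrite author's own statement) =====
-- stated objective: faster
-- what changed: A builds the result char-by-char in one counting loop; B first scans only for the cutoff index just past the 3rd replaceable character, then translates that whole prefix with a str.maketrans table and concatenates the untouched remainder (also drops A's dead zero-width-space join and unused import).
import Mathlib
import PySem

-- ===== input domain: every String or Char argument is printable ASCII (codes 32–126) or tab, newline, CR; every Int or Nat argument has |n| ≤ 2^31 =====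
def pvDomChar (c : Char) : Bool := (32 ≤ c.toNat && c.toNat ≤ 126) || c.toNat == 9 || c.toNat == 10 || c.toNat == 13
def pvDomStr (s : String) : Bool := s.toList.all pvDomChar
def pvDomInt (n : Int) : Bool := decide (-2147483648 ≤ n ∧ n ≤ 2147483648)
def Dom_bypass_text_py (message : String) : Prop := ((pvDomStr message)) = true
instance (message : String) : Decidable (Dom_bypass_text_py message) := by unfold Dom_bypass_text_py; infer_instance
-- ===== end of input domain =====

-- B replaces A's counting character-by-character loop by a cutoff scan plus a wholesale
-- translation of the prefix (a different two-pass decomposition, same result).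

-- ===== PORT A =====
-- the replacements dict, as an association list (insertion order)
def pvPairs : List (Char × Char) :=
  [('a','а'),('e','е'),('o','о'),('p','р'),('c','с'),('x','х'),
   ('A','А'),('E','Е'),('O','О'),('B','В'),('H','Н'),('M','М')]

-- the counting loop of A: `for ch in message: if ch in replacements and count < 3 …`
def pvGoA : List Char → Nat → List Char
  | [], _ => []
  | c :: t, cnt =>
    if (pvPairs.lookup c).isSome && decide (cnt < 3) then
      ((pvPairs.lookup c).getD c) :: pvGoA t (cnt + 1)
    else
      c :: pvGoA t cnt

def bypass_text_py (message : String) : String :=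
  let zwsp := "\u200B"
  let _result := String.intercalate zwsp (message.toList.map (fun c => String.mk [c]))  -- dead in A too
  String.mk (pvGoA message.toList 0)

-- ===== PORT B =====
-- cutoff scan: length of the shortest prefix containing `n` replaceable chars (whole list if fewer)
def pvCut : List Char → Nat → Nat
  | [], _ => 0
  | c :: t, n =>
    if (pvPairs.lookup c).isSome then
      if n = 1 then 1 else 1 + pvCut t (n - 1)
    else
      1 + pvCut t n

def bypass_text_py_alt (message : String) : String :=
  let l := message.toList
  let cut := pvCut l 3
  String.mk ((l.take cut).map (fun c => (pvPairs.lookup c).getD c) ++ l.drop cut)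

-- ===== PRECONDITION & SPEC =====
def Spec_bypass_text_py (message : String) (out : String) : Prop := out = bypass_text_py_alt message
instance (message : String) (out : String) : Decidable (Spec_bypass_text_py message out) := by unfold Spec_bypass_text_py; infer_instance

-- ===== CLAIM (what is proved, stated in full; the proofs are below) =====
def Claim_equal_bypass_text_py : Prop := ∀ (message : String), Dom_bypass_text_py message → Spec_bypass_text_py message (bypass_text_py message)

-- ===== LEMMAS AND PROOFS =====
theorem pvGoA_three : ∀ l : List Char, pvGoA l 3 = l := by
  intro l
  induction l with
  | nil => rfl
  | cons c t ih => simp [pvGoA, ih]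

theorem pvGoA_eq_cut : ∀ (l : List Char) (n : Nat), 1 ≤ n → n ≤ 3 →
    pvGoA l (3 - n) =
      (l.take (pvCut l n)).map (fun c => (pvPairs.lookup c).getD c) ++ l.drop (pvCut l n) := by
  intro l
  induction l with
  | nil => intro n _ _; simp [pvGoA, pvCut]
  | cons c t ih =>
    intro n h1 h3
    have hlt : 3 - n < 3 := by omega
    by_cases hk : (pvPairs.lookup c).isSome
    · by_cases hn : n = 1
      · subst hn
        simp only [pvGoA, pvCut, hk, hlt, decide_true, Bool.and_true,
          if_true]
        simp [pvGoA_three]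
      · have heq : 3 - n + 1 = 3 - (n - 1) := by omega
        simp only [pvGoA, pvCut, hk, hlt, hn, decide_true, Bool.and_true,
          if_true, if_false]
        rw [heq, ih (n - 1) (by omega) (by omega), Nat.add_comm 1 (pvCut t (n - 1))]
        simp only [List.take_succ_cons, List.drop_succ_cons, List.map_cons, List.cons_append]
    · have hkc : (pvPairs.lookup c).getD c = c := by
        cases h : pvPairs.lookup c with
        | none => rfl
        | some v => rw [h] at hk; simp at hk
      simp only [pvGoA, pvCut, hk, Bool.false_and, Bool.false_eq_true, if_false]
      rw [ih n h1 h3, Nat.add_comm 1 (pvCut t n)]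
      simp only [List.take_succ_cons, List.drop_succ_cons, List.map_cons, List.cons_append, hkc]

-- ===== VERDICT (by name: the statement is the Claim_ definition above) =====
theorem bypass_text_py_spec : Claim_equal_bypass_text_py := by
  intro message _
  unfold Spec_bypass_text_py bypass_text_py bypass_text_py_alt
  exact congrArg String.mk (pvGoA_eq_cut message.toList 3 (by norm_num) (by norm_num))
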